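-- pv_equiv track=rewrite | github.com/francolmc/introduccionProgramacion2023 | Clase17/main.py | separar_numeros
-- ===== SOURCE A (Python) =====
-- def es_par(valor: int) -> bool:
--     if valor%2 == 0:
--         return True
--     return False
--
-- def es_impar(valor: int) -> bool:
--     if valor%2 != 0:
--         return True
--     return False
--
-- def separar_numeros(valor: str) -> str:
--     numeros = valor.split(',')
--     pares = ''
--     impares = ''
--     for numero in numeros:
--         if numero.isnumeric():
--             if es_par(int(numero)):
--                 pares = pares + numero + ','
--             if es_impar(int(numero)):
--                 impares = impares + numero + ','
--     return pares + impares
-- ===== SOURCE B (Python) =====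
-- def separar_numeros(valor: str) -> str:
--     toks = sorted((t for t in valor.split(',') if t.isnumeric()),
--                   key=lambda t: int(t) % 2)
--     return ''.join(t + ',' for t in toks)
-- ===== Notes on version B (the rewrite author's own statement) =====
-- stated objective: alternative
-- what changed: Replaces A's single accumulation loop threading two string accumulators with one stable sort of the numeric tokens by parity key (evens get key 0, odds key 1; stability preserves original order within each class) followed by a single join.
import Mathlib
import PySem

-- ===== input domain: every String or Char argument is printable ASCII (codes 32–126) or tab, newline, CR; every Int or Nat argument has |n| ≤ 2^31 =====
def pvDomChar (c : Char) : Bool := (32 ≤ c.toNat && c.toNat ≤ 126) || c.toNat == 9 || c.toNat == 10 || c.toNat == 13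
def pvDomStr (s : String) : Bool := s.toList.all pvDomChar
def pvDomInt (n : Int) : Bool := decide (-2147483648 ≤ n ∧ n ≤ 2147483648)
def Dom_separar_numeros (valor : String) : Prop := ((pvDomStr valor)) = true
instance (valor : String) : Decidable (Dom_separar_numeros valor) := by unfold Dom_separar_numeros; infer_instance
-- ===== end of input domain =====

-- B replaces A's single accumulation loop (two string accumulators) with one STABLE SORT of the
-- numeric tokens by parity key (evens key 0, odds key 1) followed by a single join (objective: alternative).
-- On the printable-ASCII domain str.isnumeric coincides with Chars.strIsdigit, and int() on such an
-- all-digit token always succeeds, so `(PySem.Int.ofChars? n).getD 0` is exact there.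

-- ===== PORT A =====
def pvEsPar (valor : Int) : Bool :=
  if PySem.Int.mod valor 2 = 0 then true else false

def pvEsImpar (valor : Int) : Bool :=
  if PySem.Int.mod valor 2 ≠ 0 then true else false

def pvStepA (acc : List Char × List Char) (numero : List Char) : List Char × List Char :=
  if PySem.Chars.strIsdigit numero then
    let acc1 := if pvEsPar ((PySem.Int.ofChars? numero).getD 0) then (acc.1 ++ numero ++ [','], acc.2) else acc
    if pvEsImpar ((PySem.Int.ofChars? numero).getD 0) then (acc1.1, acc1.2 ++ numero ++ [',']) else acc1
  else acc

def separar_numeros (valor : String) : String :=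
  let numeros := PySem.Chars.splitOn valor.toList [',']
  let acc := numeros.foldl pvStepA ([], [])
  String.ofList (acc.1 ++ acc.2)

-- ===== PORT B =====
def pvKeyB (t : List Char) : Int := PySem.Int.mod ((PySem.Int.ofChars? t).getD 0) 2

def separar_numeros_alt (valor : String) : String :=
  let toks := (PySem.Chars.splitOn valor.toList [',']).filter PySem.Chars.strIsdigit
  let sortedToks := PySem.List.sorted toks pvKeyB
  String.ofList (PySem.Chars.join [] (sortedToks.map (fun t => t ++ [','])))

-- ===== PRECONDITION & SPEC =====
def Spec_separar_numeros (valor : String) (out : String) : Prop := out = separar_numeros_alt valor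
instance (valor : String) (out : String) : Decidable (Spec_separar_numeros valor out) := by unfold Spec_separar_numeros; infer_instance

-- ===== CLAIM (what is proved, stated in full; the proofs are below) =====
def Claim_equal_separar_numeros : Prop := ∀ (valor : String), Dom_separar_numeros valor → Spec_separar_numeros valor (separar_numeros valor)

-- ===== LEMMAS AND PROOFS =====

theorem pvJoinNil (l : List (List Char)) : PySem.Chars.join [] l = l.flatten := by
  induction l with
  | nil => simp [PySem.Chars.join_nil]
  | cons a l ih =>
    cases l with
    | nil => simp [PySem.Chars.join_singleton]
    | cons b l' => rw [PySem.Chars.join_cons_cons]; simp [ih]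

theorem pvKeyB_cases (t : List Char) : pvKeyB t = 0 ∨ pvKeyB t = 1 := by
  have h1 := PySem.Int.mod_nonneg ((PySem.Int.ofChars? t).getD 0) (b := 2) (by omega)
  have h2 := PySem.Int.mod_lt ((PySem.Int.ofChars? t).getD 0) (b := 2) (by omega)
  unfold pvKeyB; omega

-- inserting into an evens-then-odds list keeps the shape, stably
theorem pvInsertSplit (x : List Char) (E O : List (List Char))
    (hE : ∀ e ∈ E, pvKeyB e = 0) (hO : ∀ o ∈ O, pvKeyB o = 1) :
    PySem.List.insertBy (fun a b => decide (pvKeyB a < pvKeyB b)) x (E ++ O)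
      = if pvKeyB x = 0 then E ++ x :: O else (E ++ O) ++ [x] := by
  induction E with
  | nil =>
    induction O with
    | nil => rcases pvKeyB_cases x with h | h <;> simp [PySem.List.insertBy, h]
    | cons o O ihO =>
      have ho : pvKeyB o = 1 := hO o (by simp)
      have hO' : ∀ o' ∈ O, pvKeyB o' = 1 := fun o' ho' => hO o' (by simp [ho'])
      rcases pvKeyB_cases x with h | h
      · simp [PySem.List.insertBy, h, ho]
      · simp only [List.nil_append, PySem.List.insertBy, h, ho]
        have := ihO hO'
        simp [h] at this
        simp [this]
  | cons e E ihE =>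
    have he : pvKeyB e = 0 := hE e (by simp)
    have step := ihE (fun e' he' => hE e' (by simp [he']))
    have hnlt : ¬ (pvKeyB x < pvKeyB e) := by
      rcases pvKeyB_cases x with h | h <;> omega
    rcases pvKeyB_cases x with h | h
    · simp only [List.cons_append, PySem.List.insertBy, hnlt]
      simp [h] at step ⊢; simp [step]
    · simp only [List.cons_append, PySem.List.insertBy, hnlt]
      simp [h] at step ⊢; simp [step]

theorem pvFoldInsert (ts : List (List Char)) (E O : List (List Char))
    (hE : ∀ e ∈ E, pvKeyB e = 0) (hO : ∀ o ∈ O, pvKeyB o = 1) :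
    ts.foldl (fun acc x => PySem.List.insertBy (fun a b => decide (pvKeyB a < pvKeyB b)) x acc) (E ++ O)
      = (E ++ ts.filter (fun t => pvKeyB t = 0)) ++ (O ++ ts.filter (fun t => pvKeyB t ≠ 0)) := by
  induction ts generalizing E O with
  | nil => simp
  | cons t ts ih =>
    rcases pvKeyB_cases t with h | h
    · have hins : PySem.List.insertBy (fun a b => decide (pvKeyB a < pvKeyB b)) t (E ++ O) = (E ++ [t]) ++ O := by
        rw [pvInsertSplit t E O hE hO]; simp [h]
      have hE' : ∀ e ∈ E ++ [t], pvKeyB e = 0 := by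
        intro e he
        rcases List.mem_append.1 he with h' | h'
        · exact hE e h'
        · simp at h'; subst h'; exact h
      rw [List.foldl_cons, hins, ih (E ++ [t]) O hE' hO]
      simp [h]
    · have hne : pvKeyB t ≠ 0 := by omega
      have hins : PySem.List.insertBy (fun a b => decide (pvKeyB a < pvKeyB b)) t (E ++ O) = E ++ (O ++ [t]) := by
        rw [pvInsertSplit t E O hE hO]; simp [hne]
      have hO' : ∀ o ∈ O ++ [t], pvKeyB o = 1 := by
        intro o ho
        rcases List.mem_append.1 ho with h' | h'
        · exact hO o h'
        · simp at h'; subst h'; exact h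
      rw [List.foldl_cons, hins, ih E (O ++ [t]) hE hO']
      simp [hne]

theorem pvSortedSplit (ts : List (List Char)) :
    PySem.List.sorted ts pvKeyB
      = ts.filter (fun t => pvKeyB t = 0) ++ ts.filter (fun t => pvKeyB t ≠ 0) := by
  rw [PySem.List.sorted_eq_foldl_insertBy]
  have := pvFoldInsert ts [] [] (by simp) (by simp)
  simpa using this

def pvEvenT (n : List Char) : Bool := decide (pvKeyB n = 0)

def pvP (ts : List (List Char)) : List Char :=
  (((ts.filter PySem.Chars.strIsdigit).filter pvEvenT).map (fun n => n ++ [','])).flatten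

def pvI (ts : List (List Char)) : List Char :=
  (((ts.filter PySem.Chars.strIsdigit).filter (fun n => !pvEvenT n)).map (fun n => n ++ [','])).flatten

theorem pvFold (ts : List (List Char)) (p i : List Char) :
    ts.foldl pvStepA (p, i) = (p ++ pvP ts, i ++ pvI ts) := by
  induction ts generalizing p i with
  | nil => simp [pvP, pvI]
  | cons t ts ih =>
    by_cases hd : PySem.Chars.strIsdigit t
    · by_cases he : pvKeyB t = 0
      · have hdvd : 2 ∣ (PySem.Int.ofChars? t).getD 0 :=
          (PySem.Int.mod_eq_zero_iff_dvd _ 2).1 he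
        have hstep : pvStepA (p, i) t = (p ++ t ++ [','], i) := by
          simp [pvStepA, hd, pvEsPar, pvEsImpar, hdvd]
        simp [List.foldl_cons, hstep, ih, pvP, pvI, pvEvenT, hd, he, List.append_assoc]
      · have hdvd : ¬ 2 ∣ (PySem.Int.ofChars? t).getD 0 :=
          fun hc => he ((PySem.Int.mod_eq_zero_iff_dvd _ 2).2 hc)
        have hstep : pvStepA (p, i) t = (p, i ++ t ++ [',']) := by
          simp [pvStepA, hd, pvEsPar, pvEsImpar, hdvd]
        simp [List.foldl_cons, hstep, ih, pvP, pvI, pvEvenT, hd, he, List.append_assoc]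
    · have hstep : pvStepA (p, i) t = (p, i) := by simp [pvStepA, hd]
      simp [List.foldl_cons, hstep, ih, pvP, pvI, hd]

-- ===== VERDICT (by name: the statement is the Claim_ definition above) =====
theorem separar_numeros_spec : Claim_equal_separar_numeros := by
  intro valor _
  unfold Spec_separar_numeros separar_numeros separar_numeros_alt
  simp only [pvFold, pvJoinNil, List.nil_append, pvSortedSplit]
  congr 1
  simp [pvP, pvI, pvEvenT]
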